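-- pv_equiv track=rewrite | github.com/pypi-data/pypi-mirror-354 | packages/katcrypt/katcrypt-0.1.3.tar.gz/katcrypt-0.1.3/katcrypt/ciphers/mars.py | _build_mask
-- ===== SOURCE A (Python) =====
-- def _build_mask(w):
--     """
--     Build a 32-bit mask where M_i = 1 if w_i belongs to a sequence of ten
--     consecutive 0's or 1's in w and also 2 ≤ i ≤ 30 and w_{i-1} = w_i = w_{i+1}
--     """
--     mask = 0
--     for bit in range(2, 31):
--         belongs_to_sequence = False
--
--         for start in range(max(0, bit - 9), min(bit + 1, 23)):
--             window = (w >> start) & 0x3FF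
--             if window == 0x000 or window == 0x3FF:
--                 belongs_to_sequence = True
--                 break
--
--         if belongs_to_sequence:
--             # Check if w_{i-1} = w_i = w_{i+1}
--             triple = (w >> (bit - 1)) & 0x7
--             if triple == 0b000 or triple == 0b111:
--                 mask |= (1 << bit)
--
--     return mask
-- ===== SOURCE B (Python) =====
-- def _build_mask(w):
--     """
--     Branchless bit-parallel version: one xor gives the 'adjacent bits differ'
--     vector, shifted ORs find all-equal 10-bit windows at once, a shifted OR
--     spreads window membership, and the triple check is two more masked ANDs.
--     """
--     u = w & 0xFFFFFFFF            # the 32 bits the mask depends on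
--     x = u ^ (u >> 1)              # bit s set iff w_s != w_{s+1}
--     z = 0
--     for k in range(9):
--         z |= x >> k               # bit s set iff w_s..w_{s+9} are not all equal
--     runs = (z & 0x7FFFFF) ^ 0x7FFFFF      # window starts 0..22 that are all-equal
--     spread = 0
--     for k in range(10):
--         spread |= runs << k       # bit i set iff some all-equal window contains i
--     smooth = ((x | (x << 1)) & 0x7FFFFFFC) ^ 0x7FFFFFFC  # w_{i-1}=w_i=w_{i+1}, 2<=i<=30
--     return spread & smooth
-- ===== Notes on version B (the rewrite author's own statement) =====
-- stated objective: alternative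
-- what changed: Replaces the per-bit rescan of up to ten overlapping ten-bit windows (and the per-bit triple test) by a branchless bit-parallel computation: one xor yields the adjacent-bits-differ vector, nine shifted ORs detect every all-equal window at once, ten shifted ORs spread window membership to bit positions, and the triple check becomes a single masked AND.
import Mathlib
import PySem

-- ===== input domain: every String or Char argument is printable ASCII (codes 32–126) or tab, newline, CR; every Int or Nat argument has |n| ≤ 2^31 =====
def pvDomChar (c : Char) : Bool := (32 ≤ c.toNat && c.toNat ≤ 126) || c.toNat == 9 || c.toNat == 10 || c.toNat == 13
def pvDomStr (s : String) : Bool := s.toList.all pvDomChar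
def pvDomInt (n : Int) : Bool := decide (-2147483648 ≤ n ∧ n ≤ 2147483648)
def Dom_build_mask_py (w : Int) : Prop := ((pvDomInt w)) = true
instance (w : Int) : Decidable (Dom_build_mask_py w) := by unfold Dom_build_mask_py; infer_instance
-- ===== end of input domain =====

-- B replaces A's per-bit rescan of overlapping 10-bit windows by a branchless
-- bit-parallel computation over the same 32 bits; proved to return A's exact value.

-- ===== PORT A =====
-- A's inner `for start in range(...)` loop with its early `break`
def pvWindowHit (w : Int) : List Int → Bool
  | [] => false
  | s :: rest =>
    let window := PySem.Int.band (w >>> s.toNat) 0x3FF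
    if window = 0x000 ∨ window = 0x3FF then true else pvWindowHit w rest

def build_mask_py (w : Int) : Int :=
  (PySem.List.pyRange 2 31 1).foldl (fun mask bit =>
    let belongs := pvWindowHit w (PySem.List.pyRange (max 0 (bit - 9)) (min (bit + 1) 23) 1)
    if belongs then
      let triple := PySem.Int.band (w >>> (bit - 1).toNat) 0x7
      if triple = 0 ∨ triple = 7 then PySem.Int.bor mask ((1 : Int) <<< bit.toNat) else mask
    else mask) 0

-- ===== PORT B =====
def build_mask_py_alt (w : Int) : Int :=
  let u := PySem.Int.band w 0xFFFFFFFF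
  let x := PySem.Int.bxor u (u >>> (1:Nat))
  let z := (PySem.List.pyRange 0 9 1).foldl (fun z k => PySem.Int.bor z (x >>> k.toNat)) 0
  let runs := PySem.Int.bxor (PySem.Int.band z 0x7FFFFF) 0x7FFFFF
  let spread := (PySem.List.pyRange 0 10 1).foldl (fun sp k => PySem.Int.bor sp (runs <<< k.toNat)) 0
  let smooth := PySem.Int.bxor (PySem.Int.band (PySem.Int.bor x (x <<< (1:Nat))) 0x7FFFFFFC) 0x7FFFFFFC
  PySem.Int.band spread smooth

-- ===== PRECONDITION & SPEC =====
def Spec_build_mask_py (w : Int) (out : Int) : Prop := out = build_mask_py_alt w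
instance (w : Int) (out : Int) : Decidable (Spec_build_mask_py w out) := by unfold Spec_build_mask_py; infer_instance

-- ===== CLAIM (what is proved, stated in full; the proofs are below) =====
def Claim_equal_build_mask_py : Prop := ∀ (w : Int), Dom_build_mask_py w → Spec_build_mask_py w (build_mask_py w)

-- ===== LEMMAS AND PROOFS =====

lemma pv_natCast_shiftRight (m k : Nat) : ((m : Int) >>> k) = ((m >>> k : Nat) : Int) := by
  rw [Int.shiftRight_eq_div_pow, Nat.shiftRight_eq_div_pow]
  push_cast
  rfl

lemma pv_natCast_shiftLeft (m k : Nat) : ((m : Int) <<< k) = ((m <<< k : Nat) : Int) := by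
  rw [Int.shiftLeft_eq, Nat.shiftLeft_eq]
  push_cast
  ring

lemma pv_band_mask (a : Int) (c : Nat) :
    PySem.Int.band a (((2:Nat)^c - 1 : Nat) : Int) = a % ((2:Nat)^c : Nat) := by
  by_cases ha : 0 ≤ a
  · rw [PySem.Int.band_of_nonneg ha (by positivity)]
    have h1 : ((((2:Nat)^c - 1 : Nat) : Int)).toNat = (2:Nat)^c - 1 := by omega
    rw [h1, Nat.and_two_pow_sub_one_eq_mod]
    have h2 : a = ((a.toNat : Nat) : Int) := by omega
    rw [h2]
    push_cast
    rfl
  · push Not at ha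
    -- negative branch of band
    have hnn : 0 ≤ -a - 1 := by omega
    set n : Nat := (-a - 1).toNat with hn
    set m : Nat := (2:Nat)^c - 1 with hm
    have hb : PySem.Int.band a ((m : Nat) : Int) = ((m - (m &&& n) : Nat) : Int) := by
      unfold PySem.Int.band
      rw [if_neg (by omega), if_pos (by positivity)]
      simp [hn]
    rw [hb]
    set P : Nat := (2:Nat)^c with hPdef
    have hP : 0 < P := by positivity
    set q : Nat := n / P with hq
    set r : Nat := n % P with hr
    have h1 : n = P * q + r := (Nat.div_add_mod n P).symm
    have h2 : r < P := Nat.mod_lt _ hP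
    have hmn : m &&& n = r := by rw [Nat.and_comm, hm, hPdef] at *; exact Nat.and_two_pow_sub_one_eq_mod n c
    rw [hmn]
    have hint : (n : Int) = (P : Int) * q + r := by exact_mod_cast congrArg (Nat.cast : Nat → Int) h1
    have key : a = ((P : Int) - 1 - r) + (P : Int) * (-(q:Int) - 1) := by
      have ha' : a = -(n:Int) - 1 := by omega
      rw [ha', hint]; ring
    rw [key, Int.add_mul_emod_self_left, Int.emod_eq_of_lt (by omega) (by omega)]
    omega

lemma pv_int_divmod (w : Int) (s c : Nat) :
    (w / (2:Int)^s) % (2:Int)^c = (w % (2:Int)^(s+c)) / (2:Int)^s := by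
  set K : Int := (2:Int)^(s+c) with hK
  set q : Int := w / K with hq
  set r : Int := w % K with hr
  have hKpos : (0:Int) < K := by positivity
  have hKq : (2:Int)^s * ((2:Int)^c * q) = K * q := by rw [hK, pow_add]; ring
  have h0 : r + K * q = w := by rw [hq, hr]; rw [Int.add_comm]; exact Int.ediv_add_emod w K
  have hw : w = r + (2:Int)^s * ((2:Int)^c * q) := by rw [hKq]; linarith [h0]
  have hr0 : 0 ≤ r := Int.emod_nonneg w (by positivity)
  have hrK : r < K := Int.emod_lt_of_pos w hKpos
  conv_lhs => rw [hw]
  rw [Int.add_mul_ediv_left _ _ (by positivity : (0:Int) < (2:Int)^s).ne',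
      Int.add_mul_emod_self_left]
  have h1 : 0 ≤ r / (2:Int)^s := Int.ediv_nonneg hr0 (by positivity)
  have h2 : r / (2:Int)^s < (2:Int)^c := by
    rw [Int.ediv_lt_iff_lt_mul (by positivity)]
    calc r < K := hrK
    _ = (2:Int)^c * (2:Int)^s := by rw [hK, pow_add]; ring
  rw [Int.emod_eq_of_lt h1 h2]

lemma pv_nat_divmod (U s c : Nat) :
    (U % 2^(s+c)) / 2^s = (U / 2^s) % 2^c := by
  apply Nat.eq_of_testBit_eq
  intro j
  rw [← Nat.shiftRight_eq_div_pow, ← Nat.shiftRight_eq_div_pow]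
  simp [Nat.testBit_shiftRight, Nat.testBit_mod_two_pow]

def pvW32 (w : Int) : Nat := (w % 4294967296).toNat

lemma pv_bridge (w : Int) (s c : Nat) (h : s + c ≤ 32) :
    PySem.Int.band (w >>> s) (((2:Nat)^c - 1 : Nat) : Int) =
      (((pvW32 w >>> s) &&& ((2:Nat)^c - 1) : Nat) : Int) := by
  rw [pv_band_mask, Int.shiftRight_eq_div_pow]
  push_cast
  rw [pv_int_divmod]
  have hd : ((2:Int)^(s+c)) ∣ (4294967296 : Int) := by
    have h1 : ((2:Int)^(s+c)) ∣ (2:Int)^32 := pow_dvd_pow 2 h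
    norm_num at h1 ⊢
    exact h1
  have hU : ((pvW32 w : Nat) : Int) = w % (4294967296 : Int) := by
    unfold pvW32
    exact Int.toNat_of_nonneg (Int.emod_nonneg w (by norm_num))
  rw [← Int.emod_emod_of_dvd w hd, ← hU]
  rw [Nat.and_two_pow_sub_one_eq_mod, Nat.shiftRight_eq_div_pow, ← pv_nat_divmod,
      Int.natCast_div, Int.natCast_mod, Int.natCast_pow, Int.natCast_pow]
  norm_num

lemma pv_testBit_one_shift (i j : Nat) : ((1 <<< i : Nat)).testBit j = decide (j = i) := by
  rw [Nat.shiftLeft_eq, one_mul, Nat.testBit_two_pow]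
  simp [eq_comm]

lemma pv_testBit_foldl_orbit (p : Nat → Bool) (l : List Nat) (m0 j : Nat) :
    ((l.foldl (fun m i => if p i then m ||| (1 <<< i) else m) m0).testBit j)
      = (m0.testBit j || (decide (j ∈ l) && p j)) := by
  induction l generalizing m0 with
  | nil => simp
  | cons a t ih =>
    rw [List.foldl_cons, ih]
    by_cases hp : p a
    · simp only [hp, if_pos, Nat.testBit_lor, pv_testBit_one_shift, List.mem_cons]
      by_cases hj : j = a
      · subst hj; simp [hp]
      · simp [hj]
    · simp only [hp, if_neg, List.mem_cons, Bool.not_eq_true] 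
      by_cases hj : j = a
      · subst hj; simp [hp]
      · simp [hj]

def pvBelongsN (U : Nat) : List Nat → Bool
  | [] => false
  | s :: rest =>
    if (U >>> s) &&& 1023 = 0 ∨ (U >>> s) &&& 1023 = 1023 then true else pvBelongsN U rest

lemma pv_belongsN_iff (U : Nat) (l : List Nat) :
    pvBelongsN U l = true ↔ ∃ s ∈ l, (U >>> s) &&& 1023 = 0 ∨ (U >>> s) &&& 1023 = 1023 := by
  induction l with
  | nil => simp [pvBelongsN]
  | cons a t ih =>
    rw [pvBelongsN]
    by_cases h : (U >>> a) &&& 1023 = 0 ∨ (U >>> a) &&& 1023 = 1023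
    · simp [h]
    · simp [h, ih]

lemma pv_eq_zero_iff_testBit (V c : Nat) :
    V &&& (2^c - 1) = 0 ↔ ∀ k < c, V.testBit k = false := by
  constructor
  · intro h k hk
    have := congrArg (fun x => x.testBit k) h
    simpa [Nat.testBit_land, Nat.testBit_two_pow_sub_one, hk] using this
  · intro h
    apply Nat.eq_of_testBit_eq
    intro i
    simp only [Nat.testBit_land, Nat.testBit_two_pow_sub_one, Nat.zero_testBit]
    by_cases hi : i < c
    · simp [h i hi, hi]
    · simp [hi]

lemma pv_eq_ones_iff_testBit (V c : Nat) :
    V &&& (2^c - 1) = 2^c - 1 ↔ ∀ k < c, V.testBit k = true := by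
  constructor
  · intro h k hk
    have := congrArg (fun x => x.testBit k) h
    simp only [Nat.testBit_land, Nat.testBit_two_pow_sub_one, hk] at this
    simpa [hk] using this
  · intro h
    apply Nat.eq_of_testBit_eq
    intro i
    simp only [Nat.testBit_land, Nat.testBit_two_pow_sub_one]
    by_cases hi : i < c
    · simp [h i hi, hi]
    · simp [hi]

-- a chain of equal adjacent bits pins every bit in the window to the first
lemma pv_chain' (V c : Nat) (h : ∀ k < c, (V.testBit k ^^ V.testBit (k+1)) = false) :
    ∀ k ≤ c, V.testBit k = V.testBit 0 := by
  intro k hk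
  induction k with
  | zero => rfl
  | succ n ih =>
    have h1 := h n (by omega)
    have h2 := ih (by omega)
    cases hv : V.testBit n <;> cases hv2 : V.testBit (n+1) <;> simp_all

lemma pv_window_iff' (V c : Nat) :
    (V &&& (2^(c+1) - 1) = 0 ∨ V &&& (2^(c+1) - 1) = 2^(c+1) - 1) ↔
      ∀ k < c, (V.testBit k ^^ V.testBit (k+1)) = false := by
  rw [pv_eq_zero_iff_testBit, pv_eq_ones_iff_testBit]
  constructor
  · rintro (h | h) k hk
    · simp [h k (by omega), h (k+1) (by omega)]
    · simp [h k (by omega), h (k+1) (by omega)]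
  · intro h
    have hch := pv_chain' V c h
    cases hv : V.testBit 0
    · left; intro k hk; rw [hch k (by omega), hv]
    · right; intro k hk; rw [hch k (by omega), hv]

def pvStarts (j : Nat) : List Nat := List.range' (j - 9) (min j 22 + 1 - (j - 9))

def pvP (U j : Nat) : Bool :=
  pvBelongsN U (pvStarts j) &&
    (((U >>> (j-1)) &&& 7 == 0) || ((U >>> (j-1)) &&& 7 == 7))

def pvAnat (U : Nat) : Nat :=
  (List.range' 2 29).foldl (fun mask j => if pvP U j then mask ||| (1 <<< j) else mask) 0

def pvXb (U m : Nat) : Bool := (U.testBit m) ^^ (U.testBit (m+1))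
def pvWinOK (U s : Nat) : Prop := ∀ k < 9, pvXb U (s+k) = false
def pvCond (U j : Nat) : Prop :=
  2 ≤ j ∧ j ≤ 30 ∧ (∃ s, j ≤ s + 9 ∧ s ≤ j ∧ s ≤ 22 ∧ pvWinOK U s) ∧
    pvXb U (j-1) = false ∧ pvXb U j = false

lemma pv_winOK_iff (U s : Nat) :
    ((U >>> s) &&& 1023 = 0 ∨ (U >>> s) &&& 1023 = 1023) ↔ pvWinOK U s := by
  have h1023 : (1023 : Nat) = 2^(9+1) - 1 := by norm_num
  rw [h1023, pv_window_iff']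
  unfold pvWinOK pvXb
  constructor
  · intro h k hk
    have := h k hk
    simpa [Nat.testBit_shiftRight, Nat.add_assoc] using this
  · intro h k hk
    have := h k hk
    simpa [Nat.testBit_shiftRight, Nat.add_assoc] using this

lemma pv_triple_iff (U j : Nat) (hj : 1 ≤ j) :
    ((U >>> (j-1)) &&& 7 = 0 ∨ (U >>> (j-1)) &&& 7 = 7) ↔
      (pvXb U (j-1) = false ∧ pvXb U j = false) := by
  have h7 : (7 : Nat) = 2^(2+1) - 1 := by norm_num
  rw [h7, pv_window_iff']
  unfold pvXb
  constructor
  · intro h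
    have h0 := h 0 (by omega)
    have h1 := h 1 (by omega)
    simp only [Nat.testBit_shiftRight] at h0 h1
    constructor
    · simpa using h0
    · have e1 : j - 1 + 1 = j := by omega
      have e2 : j - 1 + 2 = j + 1 := by omega
      simpa [e1, e2] using h1
  · rintro ⟨h0, h1⟩ k hk
    interval_cases k
    · simpa [Nat.testBit_shiftRight] using h0
    · have e1 : j - 1 + 1 = j := by omega
      have e2 : j - 1 + 2 = j + 1 := by omega
      simp only [Nat.testBit_shiftRight]
      simpa [e1, e2] using h1

lemma pv_Anat_char (U j : Nat) : (pvAnat U).testBit j = true ↔ pvCond U j := by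
  unfold pvAnat
  rw [pv_testBit_foldl_orbit]
  simp only [Nat.zero_testBit, Bool.false_or, Bool.and_eq_true, decide_eq_true_eq,
    List.mem_range'_1]
  unfold pvP
  rw [Bool.and_eq_true, pv_belongsN_iff]
  simp only [Bool.or_eq_true, beq_iff_eq]
  unfold pvCond
  constructor
  · rintro ⟨⟨hj2, hj31⟩, ⟨s, hs, hw⟩, ht⟩
    have hsmem : j - 9 ≤ s ∧ s < j - 9 + (min j 22 + 1 - (j - 9)) := List.mem_range'_1.mp hs
    refine ⟨hj2, by omega, ⟨s, by omega, by omega, by omega, (pv_winOK_iff U s).mp hw⟩, ?_⟩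
    exact (pv_triple_iff U j (by omega)).mp ht
  · rintro ⟨hj2, hj30, ⟨s, hs1, hs2, hs3, hw⟩, ht⟩
    refine ⟨⟨hj2, by omega⟩, ⟨s, ?_, (pv_winOK_iff U s).mpr hw⟩, ?_⟩
    · exact List.mem_range'_1.mpr (by omega)
    · exact (pv_triple_iff U j (by omega)).mpr ht

lemma pv_testBit_z (x m0 : Nat) (l : List Nat) (s : Nat) :
    ((l.foldl (fun z k => z ||| (x >>> k)) m0).testBit s)
      = (m0.testBit s || l.any (fun k => x.testBit (k + s))) := by
  induction l generalizing m0 with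
  | nil => simp
  | cons a t ih =>
    rw [List.foldl_cons, ih]
    simp [Nat.testBit_lor, Nat.testBit_shiftRight, Bool.or_assoc]

lemma pv_testBit_spread (r m0 : Nat) (l : List Nat) (j : Nat) :
    ((l.foldl (fun sp k => sp ||| (r <<< k)) m0).testBit j)
      = (m0.testBit j || l.any (fun k => decide (k ≤ j) && r.testBit (j - k))) := by
  induction l generalizing m0 with
  | nil => simp
  | cons a t ih =>
    rw [List.foldl_cons, ih]
    simp [Nat.testBit_lor, Nat.testBit_shiftLeft, Bool.or_assoc, ge_iff_le]

def pvBnat (U : Nat) : Nat :=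
  let x := U ^^^ (U >>> 1)
  let z := (List.range 9).foldl (fun z k => z ||| (x >>> k)) 0
  let runs := (z &&& 8388607) ^^^ 8388607
  let spread := (List.range 10).foldl (fun sp k => sp ||| (runs <<< k)) 0
  let smooth := (((x ||| (x <<< 1)) &&& 2147483644) ^^^ 2147483644)
  spread &&& smooth

lemma pv_testBit_x (U m : Nat) : ((U ^^^ (U >>> 1)).testBit m) = pvXb U m := by
  simp [Nat.testBit_xor, Nat.testBit_shiftRight, pvXb, Nat.add_comm]

lemma pv_testBit_runs (U s : Nat) :
    ((((List.range 9).foldl (fun z k => z ||| ((U ^^^ (U >>> 1)) >>> k)) 0 &&& 8388607) ^^^ 8388607).testBit s)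
      = (decide (s < 23) && (List.range 9).all (fun k => !pvXb U (s+k))) := by
  have h23 : (8388607 : Nat) = 2^23 - 1 := by norm_num
  rw [Nat.testBit_xor, Nat.testBit_land, h23, Nat.testBit_two_pow_sub_one, pv_testBit_z]
  simp only [Nat.zero_testBit, Bool.false_or, pv_testBit_x]
  by_cases hs : s < 23
  · simp only [hs, decide_true, Bool.and_true, Bool.xor_true, Bool.true_and]
    have ext : ∀ a b : Bool, (a = true ↔ b = true) → a = b := by decide
    apply ext
    simp [List.any_eq_true, List.all_eq_true, Nat.add_comm]
  · simp [hs]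

lemma pv_winB_iff (U s : Nat) :
    ((List.range 9).all (fun k => !pvXb U (s+k)) = true) ↔ pvWinOK U s := by
  rw [List.all_eq_true]
  unfold pvWinOK
  constructor
  · intro h k hk
    simpa using h k (by simpa using hk)
  · intro h k hk
    simpa using h k (by simpa using hk)

lemma pv_testBit_smooth (U j : Nat) :
    (((((U ^^^ (U >>> 1)) ||| ((U ^^^ (U >>> 1)) <<< 1)) &&& 2147483644) ^^^ 2147483644).testBit j)
      = (decide (2 ≤ j ∧ j ≤ 30) && (!pvXb U (j-1) && !pvXb U j)) := by
  have hM : (2147483644 : Nat) = (2^29 - 1) <<< 2 := by norm_num [Nat.shiftLeft_eq]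
  rw [hM]
  simp only [Nat.testBit_xor, Nat.testBit_land, Nat.testBit_lor, Nat.testBit_shiftLeft,
    Nat.testBit_two_pow_sub_one, pv_testBit_x, ge_iff_le]
  by_cases hj : 2 ≤ j ∧ j ≤ 30
  · have e1 : j - 1 + 1 = j := by omega
    simp only [(by omega : 2 ≤ j), (by omega : j - 2 < 29), (by omega : 1 ≤ j), decide_true,
      Bool.true_and, Bool.and_true, hj, and_self, Bool.xor_true]
    cases h0 : U.testBit (j-1) <;> cases h1 : U.testBit j <;> cases h2 : U.testBit (j+1) <;>
      simp_all [pvXb, e1, (by omega : 1 + j = j + 1), (by omega : 1 + (j-1) = j)]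
  · rcases Nat.lt_or_ge j 2 with hlt | hge
    · simp [(by omega : ¬ 2 ≤ j), (by omega : ¬ (2 ≤ j ∧ j ≤ 30))]
      intro h
      exact absurd h (by omega)
    · have h29 : decide (j - 2 < 29) = false := decide_eq_false (by omega)
      have h30 : decide (2 ≤ j ∧ j ≤ 30) = false := decide_eq_false (by omega)
      rw [h29, h30]
      simp

lemma pv_Bnat_char (U j : Nat) : (pvBnat U).testBit j = true ↔ pvCond U j := by
  unfold pvBnat
  simp only [Nat.testBit_land, pv_testBit_spread, Nat.zero_testBit, Bool.false_or,
    pv_testBit_runs, pv_testBit_smooth]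
  rw [Bool.and_eq_true, List.any_eq_true]
  simp only [List.mem_range, Bool.and_eq_true, decide_eq_true_eq, pv_winB_iff,
    Bool.not_eq_true']
  unfold pvCond
  constructor
  · rintro ⟨⟨k, hk10, hkj, hk23, hw⟩, ⟨hj2, hj30⟩, h0, h1⟩
    exact ⟨hj2, hj30, ⟨j - k, by omega, by omega, by omega, hw⟩, h0, h1⟩
  · rintro ⟨hj2, hj30, ⟨s, hs1, hs2, hs3, hw⟩, h0, h1⟩
    refine ⟨⟨j - s, by omega, by omega, by omega, ?_⟩, ⟨hj2, hj30⟩, h0, h1⟩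
    have e : j - (j - s) = s := by omega
    rw [e]
    exact hw

lemma pv_nat_eq (U : Nat) : pvAnat U = pvBnat U := by
  apply Nat.eq_of_testBit_eq
  intro j
  have hA := pv_Anat_char U j
  have hB := pv_Bnat_char U j
  cases hA' : (pvAnat U).testBit j <;> cases hB' : (pvBnat U).testBit j <;> simp_all

lemma pv_pyRange_natCast (len a : Nat) :
    PySem.List.pyRange (a : Int) ((a : Int) + (len : Int)) 1 = (List.range' a len).map (fun n : Nat => (n : Int)) := by
  induction len generalizing a with
  | zero => simp [PySem.List.pyRange_one_eq_nil]
  | succ n ih =>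
    rw [PySem.List.pyRange_one_cons (by omega)]
    have e2 : ((a : Int)) + 1 = ((a + 1 : Nat) : Int) := by push_cast; ring
    have e3 : ((a : Int)) + ((n + 1 : Nat) : Int) = ((a + 1 : Nat) : Int) + (n : Int) := by push_cast; ring
    rw [e3, e2, ih (a + 1), List.range'_succ]
    simp


lemma pv_windowHit_eq (w : Int) (l : List Nat) (hl : ∀ s ∈ l, s ≤ 22) :
    pvWindowHit w (l.map (fun n : Nat => (n : Int))) = pvBelongsN (pvW32 w) l := by
  induction l with
  | nil => rfl
  | cons s t ih =>
    rw [List.map_cons, pvWindowHit, pvBelongsN]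
    have h1023 : (0x3FF : Int) = (((2:Nat)^10 - 1 : Nat) : Int) := by norm_num
    have hs : ((s : Int)).toNat = s := Int.toNat_natCast s
    have hbr := pv_bridge w s 10 (by have := hl s (List.mem_cons_self ..); omega)
    simp only [hs]
    rw [h1023, hbr]
    have hcond : ((((pvW32 w >>> s) &&& ((2:Nat)^10 - 1) : Nat) : Int) = 0 ∨
        (((pvW32 w >>> s) &&& ((2:Nat)^10 - 1) : Nat) : Int) = (((2:Nat)^10 - 1 : Nat) : Int)) ↔
        ((pvW32 w >>> s) &&& 1023 = 0 ∨ (pvW32 w >>> s) &&& 1023 = 1023) := by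
      constructor
      · rintro (h | h)
        · left; exact_mod_cast h
        · right; have := Int.ofNat_inj.mp (by exact_mod_cast h); norm_num at this ⊢; exact this
      · rintro (h | h)
        · left; exact_mod_cast (congrArg (Nat.cast : Nat → Int) (by norm_num at h ⊢; exact h))
        · right; exact_mod_cast (congrArg (Nat.cast : Nat → Int) (by norm_num at h ⊢; exact h))
    by_cases hc : (pvW32 w >>> s) &&& 1023 = 0 ∨ (pvW32 w >>> s) &&& 1023 = 1023
    · rw [if_pos (hcond.mpr hc), if_pos hc]
    · rw [if_neg (fun h => hc (hcond.mp h)), if_neg hc]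
      exact ih (fun x hx => hl x (List.mem_cons_of_mem _ hx))

lemma pv_foldl_cast (l : List Nat) (fI : Int → Nat → Int) (fN : Nat → Nat → Nat) (m : Nat)
    (h : ∀ (m : Nat), ∀ b ∈ l, fI (m : Int) b = ((fN m b : Nat) : Int)) :
    l.foldl fI (m : Int) = ((l.foldl fN m : Nat) : Int) := by
  induction l generalizing m with
  | nil => rfl
  | cons a t ih =>
    rw [List.foldl_cons, List.foldl_cons, h m a (List.mem_cons_self ..)]
    exact ih _ (fun m b hb => h m b (List.mem_cons_of_mem _ hb))


lemma pv_foldl_cast0 (l : List Nat) (fI : Int → Nat → Int) (fN : Nat → Nat → Nat)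
    (h : ∀ (m : Nat), ∀ b ∈ l, fI (m : Int) b = ((fN m b : Nat) : Int)) :
    l.foldl fI 0 = ((l.foldl fN 0 : Nat) : Int) := by
  rw [show (0:Int) = ((0:Nat) : Int) from rfl]
  exact pv_foldl_cast l fI fN 0 h

lemma pv_A_bridge (w : Int) : build_mask_py w = ((pvAnat (pvW32 w) : Nat) : Int) := by
  unfold build_mask_py pvAnat
  have hout : PySem.List.pyRange 2 31 1 = (List.range' 2 29).map (fun n : Nat => (n : Int)) := by
    have h := pv_pyRange_natCast 29 2
    norm_num at h
    exact h
  rw [hout, List.foldl_map]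
  apply pv_foldl_cast0
  intro m b hb
  have hb' : 2 ≤ b ∧ b < 2 + 29 := List.mem_range'_1.mp hb
  -- inner range list
  have hinner : PySem.List.pyRange (max 0 ((b : Int) - 9)) (min ((b : Int) + 1) 23) 1
      = (pvStarts b).map (fun n : Nat => (n : Int)) := by
    have e1 : (((b - 9 : Nat)) : Int) = max 0 ((b : Int) - 9) := by omega
    have e2 : (((b - 9 : Nat)) : Int) + (((min b 22 + 1 - (b - 9) : Nat)) : Int)
        = min ((b : Int) + 1) 23 := by omega
    rw [← e1, ← e2]
    exact pv_pyRange_natCast _ _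
  simp only [hinner]
  rw [pv_windowHit_eq w (pvStarts b) (by
    intro s hs
    have := List.mem_range'_1.mp hs
    omega)]
  -- triple bridge
  have ht : ((b : Int) - 1).toNat = b - 1 := by omega
  have h7 : (0x7 : Int) = (((2:Nat)^3 - 1 : Nat) : Int) := by norm_num
  have hbr := pv_bridge w (b - 1) 3 (by omega)
  rw [ht, h7, hbr]
  have hbt : ((b : Int)).toNat = b := Int.toNat_natCast b
  rw [hbt]
  have h1 : (1 : Int) <<< b = (((1 <<< b : Nat)) : Int) := by
    have := pv_natCast_shiftLeft 1 b
    simpa using this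
  have hcond : ((((pvW32 w >>> (b-1)) &&& ((2:Nat)^3 - 1) : Nat) : Int) = 0 ∨
      (((pvW32 w >>> (b-1)) &&& ((2:Nat)^3 - 1) : Nat) : Int) = (((2:Nat)^3 - 1 : Nat) : Int)) ↔
      ((pvW32 w >>> (b-1)) &&& 7 = 0 ∨ (pvW32 w >>> (b-1)) &&& 7 = 7) := by
    norm_num
    omega
  by_cases hbel : pvBelongsN (pvW32 w) (pvStarts b)
  · simp only [hbel, if_pos]
    by_cases hc : (pvW32 w >>> (b-1)) &&& 7 = 0 ∨ (pvW32 w >>> (b-1)) &&& 7 = 7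
    · rw [if_pos (hcond.mpr hc), h1, PySem.Int.bor_natCast]
      have : pvP (pvW32 w) b = true := by
        unfold pvP
        rw [hbel]
        rcases hc with h | h <;> simp [h]
      rw [if_pos this]
    · rw [if_neg (fun h => hc (hcond.mp h))]
      have : pvP (pvW32 w) b = false := by
        unfold pvP
        push Not at hc
        simp [hc.1, hc.2]
      rw [this]
      simp
  · have hbf : pvBelongsN (pvW32 w) (pvStarts b) = false := by simpa using hbel
    simp only [hbf]
    have : pvP (pvW32 w) b = false := by
      unfold pvP
      rw [hbf]
      simp
    rw [this]
    simp


lemma pv_natCast_shiftRight_int (m k : Nat) : ((m : Int) >>> ((k : Int))) = ((m >>> k : Nat) : Int) := by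
  simp [Int.shiftRight_eq_div_pow]

lemma pv_natCast_shiftLeft_int (m k : Nat) : ((m : Int) <<< ((k : Int))) = ((m <<< k : Nat) : Int) := by
  simp [Int.shiftLeft_eq, Nat.shiftLeft_eq]

lemma pv_B_bridge (w : Int) : build_mask_py_alt w = ((pvBnat (pvW32 w) : Nat) : Int) := by
  simp only [build_mask_py_alt, pvBnat]
  have hu : PySem.Int.band w 0xFFFFFFFF = ((pvW32 w : Nat) : Int) := by
    have hm : (0xFFFFFFFF : Int) = (((2:Nat)^32 - 1 : Nat) : Int) := by norm_num
    rw [hm, pv_band_mask]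
    unfold pvW32
    rw [Int.toNat_of_nonneg (Int.emod_nonneg w (by norm_num))]
    norm_num
  rw [hu]
  set U : Nat := pvW32 w with hU
  have hx : PySem.Int.bxor (U : Int) ((U : Int) >>> (1:Nat)) = ((U ^^^ (U >>> 1) : Nat) : Int) := by
    rw [pv_natCast_shiftRight, PySem.Int.bxor_natCast]
  rw [hx]
  set X : Nat := U ^^^ (U >>> 1) with hX
  have hr9 : PySem.List.pyRange 0 9 1 = (List.range 9).map (fun n : Nat => (n : Int)) := by
    rw [List.range_eq_range']
    have h := pv_pyRange_natCast 9 0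
    simpa using h
  have hr10 : PySem.List.pyRange 0 10 1 = (List.range 10).map (fun n : Nat => (n : Int)) := by
    rw [List.range_eq_range']
    have h := pv_pyRange_natCast 10 0
    simpa using h
  rw [hr9, hr10, List.foldl_map, List.foldl_map]
  have hz : (List.range 9).foldl (fun z (k : Nat) => PySem.Int.bor z (((X : Nat) : Int) >>> ((((((k : Int)).toNat : Nat)) : Int)))) 0
      = (((List.range 9).foldl (fun z k => z ||| (X >>> k)) 0 : Nat) : Int) := by
    apply pv_foldl_cast0
    intro m k _
    rw [Int.toNat_natCast, pv_natCast_shiftRight_int, PySem.Int.bor_natCast]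
  rw [hz]
  set Z : Nat := (List.range 9).foldl (fun z k => z ||| (X >>> k)) 0 with hZ
  have hruns : PySem.Int.bxor (PySem.Int.band (Z : Int) 0x7FFFFF) 0x7FFFFF
      = (((Z &&& 8388607) ^^^ 8388607 : Nat) : Int) := by
    have e1 : (0x7FFFFF : Int) = ((8388607 : Nat) : Int) := by norm_num
    rw [e1, PySem.Int.band_natCast, PySem.Int.bxor_natCast]
  rw [hruns]
  set R : Nat := (Z &&& 8388607) ^^^ 8388607 with hR
  have hsp : (List.range 10).foldl (fun sp (k : Nat) => PySem.Int.bor sp (((R : Nat) : Int) <<< ((((((k : Int)).toNat : Nat)) : Int)))) 0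
      = (((List.range 10).foldl (fun sp k => sp ||| (R <<< k)) 0 : Nat) : Int) := by
    apply pv_foldl_cast0
    intro m k _
    rw [Int.toNat_natCast, pv_natCast_shiftLeft_int, PySem.Int.bor_natCast]
  rw [hsp]
  have hsm : PySem.Int.bxor (PySem.Int.band (PySem.Int.bor ((X : Nat) : Int) (((X : Nat) : Int) <<< (1:Nat))) 0x7FFFFFFC) 0x7FFFFFFC
      = ((((X ||| (X <<< 1)) &&& 2147483644) ^^^ 2147483644 : Nat) : Int) := by
    have e1 : (0x7FFFFFFC : Int) = ((2147483644 : Nat) : Int) := by norm_num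
    rw [e1, pv_natCast_shiftLeft, PySem.Int.bor_natCast, PySem.Int.band_natCast, PySem.Int.bxor_natCast]
  rw [hsm, PySem.Int.band_natCast]

-- ===== VERDICT (by name: the statement is the Claim_ definition above) =====
theorem build_mask_py_spec : Claim_equal_build_mask_py := by
  intro w _
  unfold Spec_build_mask_py
  rw [pv_A_bridge, pv_B_bridge, pv_nat_eq]
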